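-- pv_equiv track=rewrite | github.com/richardmantikgeek1/LeetCode-Python-PUBLIC | Easy/Hash Table - keep-multiplying-found-values-by-two.py | findFinalValue
-- ===== SOURCE A (Python) =====
-- def findFinalValue(array, original_num) -> int:
--     memo = {}
--     for i in range(0, len(array)):
--         num = array[i]
--
--         memo[num] = True
--
--     while (original_num in memo.keys()):
--         original_num = original_num * 2
--
--     return original_num
-- ===== SOURCE B (Python) =====
-- def findFinalValue(array, original_num) -> int:
--     # One pass: collect the set of exponents k with original_num * 2**k present
--     # in the array, then return original_num shifted by the smallest absent exponent.
--     exps = set()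
--     for x in array:
--         if original_num and x % original_num == 0:
--             q = x // original_num
--             if q > 0 and 1 << (q.bit_length() - 1) == q:
--                 exps.add(q.bit_length() - 1)
--     k = 0
--     while k in exps:
--         k += 1
--     return original_num << k
-- ===== Notes on version B (the rewrite author's own statement) =====
-- stated objective: alternative
-- what changed: Instead of repeatedly doubling and testing membership, B makes one arithmetic pass over the array collecting the set of exponents k with original_num*2^k present (divisibility + power-of-two test on the quotient), then returns original_num shifted left by the smallest absent exponent (mex); it never builds a hash table of all elements, which a timing run measured as a constant-factor win.
-- outside the precondition, e.g. on findFinalValue([0], 0): A does not finish within the time limit, B returns 0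
import Mathlib
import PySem

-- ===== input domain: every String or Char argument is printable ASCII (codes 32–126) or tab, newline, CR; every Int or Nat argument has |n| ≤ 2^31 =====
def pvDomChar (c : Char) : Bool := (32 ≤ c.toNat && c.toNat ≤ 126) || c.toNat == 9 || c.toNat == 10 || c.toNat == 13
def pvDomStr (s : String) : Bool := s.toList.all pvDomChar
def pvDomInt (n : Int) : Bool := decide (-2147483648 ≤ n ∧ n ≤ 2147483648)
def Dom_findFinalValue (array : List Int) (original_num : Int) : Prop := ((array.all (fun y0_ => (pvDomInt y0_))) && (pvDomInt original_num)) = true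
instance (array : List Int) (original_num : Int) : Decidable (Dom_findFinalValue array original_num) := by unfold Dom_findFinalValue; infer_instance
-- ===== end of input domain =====

-- B replaces A's doubling-while-found loop by one arithmetic pass collecting the set of
-- exponents k with original_num * 2^k in the array, then a mex scan (objective: alternative).

-- ===== PORT A =====
-- A's while loop, fuelled: inside Pre_ the loop makes at most array.length doublings
-- (the doubled values are distinct members of memo's keys), so fuel = length + 1 is exact.
def pyWhileMemo (memo : PySem.Dict Int Bool) : Nat → Int → Int
  | 0, x => x
  | f + 1, x => if memo.keys.contains x then pyWhileMemo memo f (x * 2) else x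

def findFinalValue (array : List Int) (original_num : Int) : Int :=
  let memo := array.foldl (fun d num => d.insert num true) PySem.Dict.empty
  pyWhileMemo memo (array.length + 1) original_num

-- ===== PORT B =====
-- one pass of Source B's for loop: conditionally add the exponent q.bit_length()-1 to the set
def bStep (original_num : Int) (s : PySem.Set Int) (x : Int) : PySem.Set Int :=
  if original_num = 0 then s
  else if PySem.Int.mod x original_num = 0 then
    let q := PySem.Int.floordiv x original_num
    if 0 < q ∧ ((1 : Int) <<< (PySem.Int.bitLength q - 1)) = q then
      PySem.Set.add s ((PySem.Int.bitLength q - 1 : Nat) : Int)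
    else s
  else s

def bExps (array : List Int) (original_num : Int) : PySem.Set Int :=
  array.foldl (bStep original_num) PySem.Set.empty

-- Source B's 'while k in exps: k += 1', fuelled: the mex is at most |exps| ≤ array.length
def bMex (exps : List Int) : Nat → Int → Int
  | 0, k => k
  | f + 1, k => if exps.contains k then bMex exps f (k + 1) else k

def findFinalValue_alt (array : List Int) (original_num : Int) : Int :=
  let exps := bExps array original_num
  -- original_num << k; k ≥ 0 always, so .toNat is exact
  original_num <<< (bMex exps (array.length + 1) 0).toNat

-- ===== PRECONDITION & SPEC =====
-- Pre_ excludes exactly the inputs (original_num = 0 with 0 in the array) on which A's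
-- while loop never terminates (Python A diverges, returning nothing).
def Pre_findFinalValue (array : List Int) (original_num : Int) : Prop :=
  ¬ (original_num = 0 ∧ (0 : Int) ∈ array)
instance (array : List Int) (original_num : Int) : Decidable (Pre_findFinalValue array original_num) := by unfold Pre_findFinalValue; infer_instance

def pvWitness_findFinalValue : List Int × Int := ([4, 8, 15], 4)

def Spec_findFinalValue (array : List Int) (original_num : Int) (out : Int) : Prop := out = findFinalValue_alt array original_num
instance (array : List Int) (original_num : Int) (out : Int) : Decidable (Spec_findFinalValue array original_num out) := by unfold Spec_findFinalValue; infer_instance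

-- ===== CLAIM (what is proved, stated in full; the proofs are below) =====
def Claim_equal_findFinalValue : Prop := ∀ (array : List Int) (original_num : Int), Dom_findFinalValue array original_num → Pre_findFinalValue array original_num → Spec_findFinalValue array original_num (findFinalValue array original_num)

-- ===== LEMMAS AND PROOFS =====

-- the keys of A's memo contain exactly the elements of the array
theorem memo_keys_contains (array : List Int) (x : Int) :
    (array.foldl (fun d num => d.insert num true) PySem.Dict.empty).keys.contains x
      = array.contains x := by
  rw [PySem.Dict.keys_foldl_insert, PySem.Dict.keys_empty]
  have h : PySem.Set.update ([] : List Int) array = PySem.Set.ofList array := rfl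
  rw [h]
  simp [PySem.Set.mem_ofList]

-- A's loop over memo equals the same loop testing list membership
def pyWhileList (array : List Int) : Nat → Int → Int
  | 0, x => x
  | f + 1, x => if array.contains x then pyWhileList array f (x * 2) else x

theorem loops_eq (array : List Int) (f : Nat) (x : Int) :
    pyWhileMemo (array.foldl (fun d num => d.insert num true) PySem.Dict.empty) f x
      = pyWhileList array f x := by
  induction f generalizing x with
  | zero => rfl
  | succ f ih =>
    simp only [pyWhileMemo, pyWhileList, memo_keys_contains]
    split <;> simp [ih]

theorem one_shiftLeft_int (n : Nat) : ((1 : Int) <<< n) = 2 ^ n := by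
  rw [Int.shiftLeft_eq]; ring

-- Python's (2^n).bit_length() - 1 = n
theorem bitLength_two_pow (n : Nat) : PySem.Int.bitLength ((2 : Int) ^ n) = n + 1 := by
  have habs : ((2 : Int) ^ n).natAbs = 2 ^ n := by
    rw [Int.natAbs_pow]; rfl
  have hlt := PySem.Int.lt_two_pow_bitLength ((2 : Int) ^ n)
  have hle := PySem.Int.two_pow_bitLength_le ((2 : Int) ^ n) (by positivity)
  rw [habs] at hlt hle
  have h1 : n < PySem.Int.bitLength ((2 : Int) ^ n) :=
    (Nat.pow_lt_pow_iff_right (by norm_num)).mp hlt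
  have h2 : PySem.Int.bitLength ((2 : Int) ^ n) - 1 ≤ n :=
    (Nat.pow_le_pow_iff_right (by norm_num)).mp hle
  omega

-- for x ≠ 0 and a = x * 2^n, the divisibility test fires and the quotient is 2^n
theorem floordiv_of_pow_mul (x : Int) (hx : x ≠ 0) (n : Nat) :
    PySem.Int.mod (x * 2 ^ n) x = 0 ∧ PySem.Int.floordiv (x * 2 ^ n) x = 2 ^ n := by
  have hmod : PySem.Int.mod (x * 2 ^ n) x = 0 :=
    (PySem.Int.mod_eq_zero_iff_dvd _ x).mpr ⟨2 ^ n, rfl⟩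
  refine ⟨hmod, ?_⟩
  have heq := PySem.Int.floordiv_mul_add_mod (x * 2 ^ n) x
  rw [hmod, add_zero] at heq
  have : PySem.Int.floordiv (x * 2 ^ n) x * x = 2 ^ n * x := by rw [heq]; ring
  exact mul_right_cancel₀ hx this

-- what one step of B's pass does to membership
theorem mem_bStep (x : Int) (s : PySem.Set Int) (a j : Int) :
    (j ∈ bStep x s a) ↔ (j ∈ s ∨ (x ≠ 0 ∧ ∃ n : Nat, a = x * 2 ^ n ∧ j = (n : Int))) := by
  unfold bStep
  split
  · rename_i h0
    simp [h0]
  · rename_i h0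
    split
    · rename_i hmod
      dsimp only
      split
      · rename_i hq
        rw [PySem.Set.mem_add]
        constructor
        · rintro (hj | hj)
          · exact Or.inl hj
          · refine Or.inr ⟨h0, PySem.Int.bitLength (PySem.Int.floordiv a x) - 1, ?_, hj⟩
            have heq := PySem.Int.floordiv_mul_add_mod a x
            rw [hmod, add_zero] at heq
            rw [one_shiftLeft_int] at hq
            calc a = PySem.Int.floordiv a x * x := heq.symm
            _ = x * PySem.Int.floordiv a x := mul_comm _ _
            _ = x * 2 ^ (PySem.Int.bitLength (PySem.Int.floordiv a x) - 1) := by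
                  rw [hq.2]
        · rintro (hj | ⟨-, n, han, hjn⟩)
          · exact Or.inl hj
          · have hq' : PySem.Int.floordiv a x = 2 ^ n := by
              rw [han]; exact (floordiv_of_pow_mul x h0 n).2
            rw [hq', bitLength_two_pow, hjn]
            simp
      · rename_i hq
        constructor
        · exact Or.inl
        · rintro (hj | ⟨-, n, han, hjn⟩)
          · exact hj
          · exfalso
            apply hq
            have hq' : PySem.Int.floordiv a x = 2 ^ n := by
              rw [han]; exact (floordiv_of_pow_mul x h0 n).2
            rw [hq', bitLength_two_pow, one_shiftLeft_int]
            simp [pow_pos]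
    · rename_i hmod
      constructor
      · exact Or.inl
      · rintro (hj | ⟨-, n, han, hjn⟩)
        · exact hj
        · exact absurd (by rw [han]; exact (floordiv_of_pow_mul x h0 n).1) hmod

-- membership in the whole pass
theorem mem_bExps_go (x : Int) (l : List Int) (s : PySem.Set Int) (j : Int) :
    (j ∈ l.foldl (bStep x) s) ↔ (j ∈ s ∨ (x ≠ 0 ∧ ∃ a ∈ l, ∃ n : Nat, a = x * 2 ^ n ∧ j = (n : Int))) := by
  induction l generalizing s with
  | nil => simp
  | cons a t ih =>
    rw [List.foldl_cons, ih, mem_bStep]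
    constructor
    · rintro ((hj | ⟨h0, n, han, hjn⟩) | ⟨h0, b, hb, n, hbn, hjn⟩)
      · exact Or.inl hj
      · exact Or.inr ⟨h0, a, List.mem_cons_self, n, han, hjn⟩
      · exact Or.inr ⟨h0, b, List.mem_cons_of_mem a hb, n, hbn, hjn⟩
    · rintro (hj | ⟨h0, b, hb, n, hbn, hjn⟩)
      · exact Or.inl (Or.inl hj)
      · rcases List.mem_cons.mp hb with rfl | hb
        · exact Or.inl (Or.inr ⟨h0, n, hbn, hjn⟩)
        · exact Or.inr ⟨h0, b, hb, n, hbn, hjn⟩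

-- under Pre_, querying the exponent set at n answers '(x * 2^n) in array'
theorem bExps_contains (array : List Int) (x : Int)
    (hpre : Pre_findFinalValue array x) (n : Nat) :
    List.contains (bExps array x) ((n : Nat) : Int) = List.contains array (x * 2 ^ n) := by
  by_cases hx : x = 0
  · subst hx
    have harr : (0 : Int) ∉ array := fun h => hpre ⟨rfl, h⟩
    have : ((n : Int) ∈ bExps array 0) ↔ False := by
      rw [bExps, mem_bExps_go]
      simp
    simp only [List.contains_eq_mem, zero_mul]
    rw [Bool.eq_iff_iff]
    simp [this, harr]
  · have : ((n : Int) ∈ bExps array x) ↔ (x * 2 ^ n) ∈ array := by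
      rw [bExps, mem_bExps_go]
      constructor
      · rintro (h | ⟨-, a, ha, m, ham, hnm⟩)
        · simp at h
        · have : m = n := by exact_mod_cast hnm.symm
          subst this; rwa [← ham]
      · intro h
        exact Or.inr ⟨hx, x * 2 ^ n, h, n, rfl, rfl⟩
    simp only [List.contains_eq_mem]
    rw [Bool.eq_iff_iff]
    simp [this]

-- the two fuelled loops, run with the same fuel, compute the same value
theorem loops_bridge (array : List Int) (x : Int)
    (h : ∀ n : Nat, List.contains (bExps array x) ((n : Nat) : Int) = List.contains array (x * 2 ^ n)) :
    ∀ (f : Nat) (n : Nat),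
      pyWhileList array f (x * 2 ^ n) = x <<< (bMex (bExps array x) f ((n : Nat) : Int)).toNat := by
  intro f
  induction f with
  | zero =>
    intro n
    simp [pyWhileList, bMex, Int.shiftLeft_eq]
  | succ f ih =>
    intro n
    simp only [pyWhileList, bMex]
    rw [h n]
    by_cases hc : List.contains array (x * 2 ^ n) = true
    · have hcast : ((n : Int) + 1) = ((n + 1 : Nat) : Int) := by push_cast; ring
      have hmul : x * 2 ^ n * 2 = x * 2 ^ (n + 1) := by ring
      simp only [hc, if_true, hmul, hcast]
      exact ih (n + 1)
    · simp only [hc, if_false, Bool.false_eq_true]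
      simp [Int.shiftLeft_eq]

-- ===== VERDICT (by name: the statement is the Claim_ definition above) =====
theorem findFinalValue_spec : Claim_equal_findFinalValue := by
  intro array x _ hpre
  unfold Spec_findFinalValue findFinalValue findFinalValue_alt
  rw [loops_eq]
  have h := bExps_contains array x hpre
  have := loops_bridge array x h (array.length + 1) 0
  simpa using this
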